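-- pv_equiv track=rewrite | github.com/caina-barbosa/brainlift-connections | backend/main.py | find_section_node
-- ===== SOURCE A (Python) =====
-- def find_section_node(items: list[dict], section_variants: list[str]) -> dict | None:
--     """Find a top-level node matching one of the section name variants"""
--     # Find root node first
--     root_id = None
--     for item in items:
--         if "prnt" not in item or item.get("prnt") is None:
--             root_id = item["id"]
--             break
--
--     if not root_id:
--         return None
--
--     # Find direct children of root that match section names
--     for item in items:
--         if item.get("prnt") == root_id:
--             name = item.get("nm", "").strip()
--             for variant in section_variants:
--                 if variant.lower() in name.lower():
--                     return item
--
--     return None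
-- ===== SOURCE B (Python) =====
-- def find_section_node(items: list[dict], section_variants: list[str]) -> dict | None:
--     """Single indexing pass: record the first root id and group items by parent,
--     then scan only the root's children for a name match."""
--     root_id = None
--     children = {}
--     for item in items:
--         p = item.get("prnt")
--         if p is None:
--             if root_id is None:
--                 root_id = item["id"]
--         else:
--             children.setdefault(p, []).append(item)
--
--     if not root_id:
--         return None
--
--     variants_l = [v.lower() for v in section_variants]
--     for child in children.get(root_id, []):
--         name_l = child.get("nm", "").strip().lower()
--         if any(v in name_l for v in variants_l):
--             return child
--     return None
-- ===== Notes on version B (the rewrite author's own statement) =====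
-- stated objective: alternative
-- what changed: Replaces A's two full scans (one to find the root, one over all items testing each for root parenthood and name match) by a single indexing pass that records the first root id and groups items by parent into a dict, then scans only the root's children list.
import Mathlib
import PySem

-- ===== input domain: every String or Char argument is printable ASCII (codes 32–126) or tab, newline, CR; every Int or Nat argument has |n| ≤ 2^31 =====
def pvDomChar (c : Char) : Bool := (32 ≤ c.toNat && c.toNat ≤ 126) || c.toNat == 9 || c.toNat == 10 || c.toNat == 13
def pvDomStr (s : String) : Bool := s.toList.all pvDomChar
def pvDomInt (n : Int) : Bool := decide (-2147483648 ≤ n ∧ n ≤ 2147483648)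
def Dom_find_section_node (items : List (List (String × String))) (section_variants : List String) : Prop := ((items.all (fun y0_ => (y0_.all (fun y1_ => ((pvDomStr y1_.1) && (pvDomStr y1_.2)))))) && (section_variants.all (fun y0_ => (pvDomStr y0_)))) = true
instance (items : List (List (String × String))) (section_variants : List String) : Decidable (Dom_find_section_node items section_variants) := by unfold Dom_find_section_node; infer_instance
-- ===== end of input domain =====

-- B replaces A's two full scans by one grouping pass (a parent→children index) plus a scan
-- of the root's children only (objective: alternative decomposition, same asymptotic cost).

-- item.get(k) on a dict given as its pair list (Python dict semantics: later duplicates overwrite)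
def pvGetK (item : List (String × String)) (k : String) : Option String :=
  (PySem.Dict.ofList item).get? k

-- ===== PORT A =====
-- first loop of A: root_id = first item with no "prnt" key; item["id"] (none = KeyError, excluded by Pre_)
def pvFindRootA : List (List (String × String)) → Option String
  | [] => none
  | it :: rest =>
      if pvGetK it "prnt" = none then pvGetK it "id"
      else pvFindRootA rest

-- A's inner variant loop: does any variant.lower() occur in name.lower()?
def pvMatchA (it : List (String × String)) (section_variants : List String) : Bool :=
  let name := PySem.Str.strip ((pvGetK it "nm").getD "")
  section_variants.any (fun v => PySem.Str.isIn (PySem.Str.lower v) (PySem.Str.lower name))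

-- A's second loop over all items
def pvScanA (root : String) (section_variants : List String) :
    List (List (String × String)) → Option (List (String × String))
  | [] => none
  | it :: rest =>
      if pvGetK it "prnt" = some root then
        if pvMatchA it section_variants then some it else pvScanA root section_variants rest
      else pvScanA root section_variants rest

def find_section_node (items : List (List (String × String))) (section_variants : List String) : Option (List (String × String)) :=
  match pvFindRootA items with
  | none => none
  | some r => if r = "" then none else pvScanA r section_variants items

-- ===== PORT B =====
-- one pass: (root_id so far, parent → children index)
def pvStepB (st : Option String × PySem.Dict String (List (List (String × String))))
    (it : List (String × String)) :
    Option String × PySem.Dict String (List (List (String × String))) :=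
  match pvGetK it "prnt" with
  | none => (if st.1 = none then pvGetK it "id" else st.1, st.2)
  | some p => (st.1, st.2.modify p [] (· ++ [it]))

-- scan of the root's children list against the pre-lowered variants
def pvScanB (variants_l : List String) :
    List (List (String × String)) → Option (List (String × String))
  | [] => none
  | it :: rest =>
      let name_l := PySem.Str.lower (PySem.Str.strip ((pvGetK it "nm").getD ""))
      if variants_l.any (fun v => PySem.Str.isIn v name_l) then some it
      else pvScanB variants_l rest

def find_section_node_alt (items : List (List (String × String))) (section_variants : List String) : Option (List (String × String)) :=
  let st := items.foldl pvStepB (none, PySem.Dict.empty)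
  match st.1 with
  | none => none
  | some r =>
      if r = "" then none
      else pvScanB (section_variants.map PySem.Str.lower) (st.2.getD r [])

-- ===== PRECONDITION & SPEC =====
-- Pre_ excludes exactly the inputs where A raises KeyError: the first item lacking a
-- "prnt" key also lacks an "id" key (B raises the same KeyError there).
def Pre_find_section_node (items : List (List (String × String))) (section_variants : List String) : Prop :=
  ((items.find? (fun it => ((PySem.Dict.ofList it).get? "prnt").isNone)).all
    (fun it => ((PySem.Dict.ofList it).get? "id").isSome)) = true
instance (items : List (List (String × String))) (section_variants : List String) : Decidable (Pre_find_section_node items section_variants) := by unfold Pre_find_section_node; infer_instance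

def pvWitness_find_section_node : (List (List (String × String))) × List String :=
  ([[("id", "r")], [("prnt", "r"), ("nm", " Sec One ")]], ["sec"])

def Spec_find_section_node (items : List (List (String × String))) (section_variants : List String) (out : Option (List (String × String))) : Prop := out = find_section_node_alt items section_variants
instance (items : List (List (String × String))) (section_variants : List String) (out : Option (List (String × String))) : Decidable (Spec_find_section_node items section_variants out) := by unfold Spec_find_section_node; infer_instance

-- ===== CLAIM (what is proved, stated in full; the proofs are below) =====
def Claim_equal_find_section_node : Prop := ∀ (items : List (List (String × String))) (section_variants : List String), Dom_find_section_node items section_variants → Pre_find_section_node items section_variants → Spec_find_section_node items section_variants (find_section_node items section_variants)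

-- ===== LEMMAS AND PROOFS =====

-- the first component of B's fold only depends on the root accumulator
def pvRootStep (r : Option String) (it : List (String × String)) : Option String :=
  match pvGetK it "prnt" with
  | none => if r = none then pvGetK it "id" else r
  | some _ => r

theorem fst_foldl_pvStepB (l : List (List (String × String)))
    (st : Option String × PySem.Dict String (List (List (String × String)))) :
    (l.foldl pvStepB st).1 = l.foldl pvRootStep st.1 := by
  induction l generalizing st with
  | nil => rfl
  | cons it rest ih =>
      simp only [List.foldl_cons]
      rw [ih]
      congr 1
      simp only [pvStepB, pvRootStep]
      cases pvGetK it "prnt" <;> rfl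

theorem foldl_pvRootStep_some (l : List (List (String × String))) (v : String) :
    l.foldl pvRootStep (some v) = some v := by
  induction l with
  | nil => rfl
  | cons it rest ih =>
      simp only [List.foldl_cons]
      have : pvRootStep (some v) it = some v := by
        simp only [pvRootStep]; cases pvGetK it "prnt" <;> simp
      rw [this, ih]

-- under Pre_, B's root accumulator at the end equals A's first-loop result
theorem root_agree (l : List (List (String × String)))
    (hpre : ((l.find? (fun it => ((PySem.Dict.ofList it).get? "prnt").isNone)).all
      (fun it => ((PySem.Dict.ofList it).get? "id").isSome)) = true) :
    l.foldl pvRootStep none = pvFindRootA l := by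
  induction l with
  | nil => rfl
  | cons it rest ih =>
      by_cases h : pvGetK it "prnt" = none
      · have hp : ((PySem.Dict.ofList it).get? "prnt").isNone = true := by
          simpa [pvGetK, Option.isNone_iff_eq_none] using h
        rw [List.find?_cons_of_pos (p := fun it => ((PySem.Dict.ofList it).get? "prnt").isNone) hp] at hpre
        simp only [Option.all_some] at hpre
        obtain ⟨v, hv⟩ := Option.isSome_iff_exists.mp hpre
        simp only [List.foldl_cons, pvRootStep, pvFindRootA]
        rw [h]
        have hid : pvGetK it "id" = some v := by simpa [pvGetK] using hv
        simp [hid, foldl_pvRootStep_some]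
      · have hp : ¬ (((PySem.Dict.ofList it).get? "prnt").isNone = true) := by
          intro hcon
          exact h (by simpa [pvGetK, Option.isNone_iff_eq_none] using hcon)
        rw [List.find?_cons_of_neg (p := fun it => ((PySem.Dict.ofList it).get? "prnt").isNone) hp] at hpre
        simp only [List.foldl_cons, pvRootStep, pvFindRootA]
        cases hg : pvGetK it "prnt" with
        | none => exact absurd hg h
        | some p => simpa using ih hpre

-- the children index: getD of the fold's dict is the filtered item list
theorem getD_foldl_pvStepB (l : List (List (String × String)))
    (st : Option String × PySem.Dict String (List (List (String × String)))) (r : String) :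
    (l.foldl pvStepB st).2.getD r [] =
      st.2.getD r [] ++ l.filter (fun it => pvGetK it "prnt" == some r) := by
  induction l generalizing st with
  | nil => simp
  | cons it rest ih =>
      simp only [List.foldl_cons, List.filter_cons]
      rw [ih]
      cases hg : pvGetK it "prnt" with
      | none =>
          simp only [pvStepB, hg]
          simp [hg]
      | some p =>
          simp only [pvStepB, hg]
          rw [PySem.Dict.getD_modify]
          by_cases hpr : r = p
          · subst hpr
            simp [hg]
          · have hpr' : ¬ p = r := fun h => hpr h.symm
            simp [hpr, hpr']

-- A's inner variant loop equals B's any-test against the pre-lowered variants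
theorem match_agree (it : List (String × String)) (vs : List String) :
    pvMatchA it vs =
      (vs.map PySem.Str.lower).any
        (fun v => PySem.Str.isIn v (PySem.Str.lower (PySem.Str.strip ((pvGetK it "nm").getD "")))) := by
  simp only [pvMatchA, List.any_map, Function.comp_def]

-- A's second scan equals B's scan of the filtered (= indexed) children list
theorem scan_agree (r : String) (vs : List String) (l : List (List (String × String))) :
    pvScanA r vs l = pvScanB (vs.map PySem.Str.lower) (l.filter (fun it => pvGetK it "prnt" == some r)) := by
  induction l with
  | nil => rfl
  | cons it rest ih =>
      by_cases h : pvGetK it "prnt" = some r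
      · have hfilter : List.filter (fun it => pvGetK it "prnt" == some r) (it :: rest) =
            it :: List.filter (fun it => pvGetK it "prnt" == some r) rest := by
          simp [List.filter_cons, h]
        rw [hfilter]
        simp only [pvScanA, pvScanB, if_pos h]
        rw [← match_agree]
        by_cases hmv : pvMatchA it vs = true
        · rw [if_pos hmv, if_pos hmv]
        · rw [if_neg hmv, if_neg hmv]; exact ih
      · have hfilter : List.filter (fun it => pvGetK it "prnt" == some r) (it :: rest) =
            List.filter (fun it => pvGetK it "prnt" == some r) rest := by
          simp [List.filter_cons, h]
        rw [hfilter]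
        simp only [pvScanA, if_neg h]
        exact ih

-- ===== VERDICT (by name: the statement is the Claim_ definition above) =====
theorem find_section_node_spec : Claim_equal_find_section_node := by
  intro items section_variants _dom hpre
  unfold Pre_find_section_node at hpre
  unfold Spec_find_section_node find_section_node find_section_node_alt
  simp only [fst_foldl_pvStepB, getD_foldl_pvStepB, PySem.Dict.getD_empty, List.nil_append]
  rw [root_agree items hpre]
  cases hr : pvFindRootA items with
  | none => rfl
  | some r =>
      by_cases hre : r = ""
      · simp [hre]
      · simp only [if_neg hre]
        exact scan_agree r section_variants items
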